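-- pv_equiv track=rewrite | github.com/dmt94/bookbot | main.py | dict_char_count
-- ===== SOURCE A (Python) =====
-- def dict_char_count(book):
--   letters_in_book_dict = {}
--   all_words = book.split()
--
--   for word in all_words:
--     for letter in word:
--       letter = letter.lower()
--       if letter.isalpha() and letter in letters_in_book_dict.keys():
--         letters_in_book_dict[letter] += 1
--       elif letter.isalpha():
--         letters_in_book_dict[letter] = 1
--
--   ordered_characters = sorted(letters_in_book_dict.items())
--
--   return {k:v for k,v in ordered_characters}
-- ===== SOURCE B (Python) =====
-- def _groups(letters):
--   # letters is sorted; emit (char, run length) for each maximal run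
--   if not letters:
--     return []
--   c = letters[0]
--   run = 1
--   while run < len(letters) and letters[run] == c:
--     run += 1
--   return [(c, run)] + _groups(letters[run:])
--
-- def dict_char_count(book):
--   letters = sorted(c.lower() for c in book if c.isalpha())
--   return {c: n for c, n in _groups(letters)}
-- ===== Notes on version B (the rewrite author's own statement) =====
-- stated objective: alternative
-- what changed: Replaces the word-split plus hash-map tally with a filter-lower pass over the raw string, a sort of the letter list, and a run-length scan over the sorted list that emits each letter's count directly in sorted order.
import Mathlib
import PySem

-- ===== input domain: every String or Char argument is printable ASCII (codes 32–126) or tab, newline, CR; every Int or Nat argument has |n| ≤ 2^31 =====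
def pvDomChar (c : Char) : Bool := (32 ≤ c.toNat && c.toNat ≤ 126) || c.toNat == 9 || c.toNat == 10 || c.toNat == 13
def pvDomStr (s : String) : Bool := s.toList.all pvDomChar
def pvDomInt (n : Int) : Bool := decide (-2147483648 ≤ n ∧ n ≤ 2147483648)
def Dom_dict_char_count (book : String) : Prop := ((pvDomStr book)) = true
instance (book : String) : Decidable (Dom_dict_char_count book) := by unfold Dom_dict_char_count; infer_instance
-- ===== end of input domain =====

-- B replaces A's word-split + hash-map tally with filter-lower, sort, and a run-length scan of the sorted letter list (objective: alternative, same result).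

-- ===== PORT A =====
def dict_char_count (book : String) : List (String × Int) :=
  let allWords := PySem.Str.split₀ book
  let d := allWords.foldl (fun d word =>
      word.toList.foldl (fun (d : PySem.Dict String Int) ch =>
        -- letter = letter.lower()  (each letter of a word is a 1-char string)
        let letter := PySem.Str.lower (String.ofList [ch])
        if PySem.Str.strIsalpha letter && d.contains letter then
          d.insert letter (d.getD letter 0 + 1)   -- d[letter] += 1 (key present: contains is true in this branch, so getD is exact)
        else if PySem.Str.strIsalpha letter then
          d.insert letter 1
        else d) d)
    PySem.Dict.empty
  -- ordered_characters = sorted(d.items())  (tuples compare lexicographically: sorted2)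
  let ordered := PySem.List.sorted2 d.items Prod.fst Prod.snd
  -- return {k: v for k, v in ordered_characters}
  (ordered.foldl (fun (d : PySem.Dict String Int) p => d.insert p.1 p.2) PySem.Dict.empty).items

-- ===== PORT B =====
-- _groups(letters): the while loop counts the leading run of letters[0] (= 1 + length of the
-- equal prefix of the tail, exact for the index loop); letters[run:] is the rest (dropWhile).
def pvGroups : List Char → List (String × Int)
  | [] => []
  | c :: rest =>
      (String.ofList [c], 1 + ((rest.takeWhile (· == c)).length : Int)) ::
        pvGroups (rest.dropWhile (· == c))
  termination_by l => l.length
  decreasing_by simpa using Nat.lt_succ_of_le (List.length_dropWhile_le _ rest)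

def dict_char_count_alt (book : String) : List (String × Int) :=
  -- letters = sorted(c.lower() for c in book if c.isalpha())
  let letters := PySem.List.sorted ((book.toList.filter PySem.Chars.isalpha).map PySem.Chars.lowerChar) (fun x => x)
  -- return {c: n for c, n in _groups(letters)}
  ((pvGroups letters).foldl (fun (d : PySem.Dict String Int) p => d.insert p.1 p.2) PySem.Dict.empty).items

-- ===== PRECONDITION & SPEC =====
def Spec_dict_char_count (book : String) (out : List (String × Int)) : Prop := out = dict_char_count_alt book
instance (book : String) (out : List (String × Int)) : Decidable (Spec_dict_char_count book out) := by unfold Spec_dict_char_count; infer_instance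

-- ===== CLAIM (what is proved, stated in full; the proofs are below) =====
def Claim_equal_dict_char_count : Prop := ∀ (book : String), Dom_dict_char_count book → Spec_dict_char_count book (dict_char_count book)

-- ===== LEMMAS AND PROOFS =====

theorem pv_char_le_iff (a c : Char) : (a ≤ c) ↔ (a.toNat ≤ c.toNat) := by
  rw [Char.le_def]; exact UInt32.le_iff_toNat_le

theorem pv_alpha_lower (c : Char) :
    PySem.Chars.isalpha (PySem.Chars.lowerChar c) = PySem.Chars.isalpha c := by
  have hA : ('A').toNat = 65 := rfl
  have hZ : ('Z').toNat = 90 := rfl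
  have ha : ('a').toNat = 97 := rfl
  have hz : ('z').toNat = 122 := rfl
  simp only [PySem.Chars.isalpha, PySem.Chars.lowerChar, PySem.Chars.isupper, PySem.Chars.islower,
    pv_char_le_iff, hA, hZ, ha, hz]
  by_cases h : 65 ≤ c.toNat ∧ c.toNat ≤ 90
  · have hv : (c.toNat + 32).isValidChar := by left; omega
    have ht : (Char.ofNat (c.toNat + 32)).toNat = c.toNat + 32 := by
      rw [Char.toNat_ofNat, if_pos hv]
    rw [if_pos (by simp [h.1, h.2])]
    have f1 : ¬ (Char.ofNat (c.toNat + 32)).toNat ≤ 90 := by rw [ht]; omega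
    have f2 : 97 ≤ (Char.ofNat (c.toNat + 32)).toNat := by rw [ht]; omega
    have f3 : (Char.ofNat (c.toNat + 32)).toNat ≤ 122 := by rw [ht]; omega
    simp [f1, f2, f3, h.1, h.2]
  · rw [if_neg (by simp; omega)]

theorem pv_alpha_not_space (c : Char) (h : PySem.Chars.isalpha c = true) :
    PySem.Chars.isspace c = false := by
  have hA : ('A').toNat = 65 := rfl
  have hZ : ('Z').toNat = 90 := rfl
  have ha : ('a').toNat = 97 := rfl
  have hz : ('z').toNat = 122 := rfl
  simp only [PySem.Chars.isalpha, PySem.Chars.isupper, PySem.Chars.islower,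
    pv_char_le_iff, hA, hZ, ha, hz] at h
  simp only [PySem.Chars.isspace]
  simp at h ⊢
  omega

theorem pv_strIsalpha_one (c : Char) :
    PySem.Str.strIsalpha (String.ofList [c]) = PySem.Chars.isalpha c := by
  rw [PySem.Str.strIsalpha_eq, String.toList_ofList]
  simp [PySem.Chars.strIsalpha]

theorem pv_lower_one (c : Char) :
    PySem.Str.lower (String.ofList [c]) = String.ofList [PySem.Chars.lowerChar c] := by
  apply String.toList_inj.mp
  rw [PySem.Str.toList_lower, String.toList_ofList, String.toList_ofList]
  simp [PySem.Chars.lower]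

theorem pv_s1_inj : Function.Injective (fun c : Char => String.ofList [c]) := by
  intro a b h
  have := congrArg String.toList h
  simpa using this

theorem pv_s1_lt {c d : Char} (h : c < d) : String.ofList [c] < String.ofList [d] := by
  rw [String.lt_iff_toList_lt]
  simp [List.cons_lt_cons_iff, h]

theorem pv_flatten_go (s : List Char) : ∀ (cur : List Char) (acc : List (List Char)),
    (PySem.Chars.split₀.go s cur acc).flatten =
      acc.reverse.flatten ++ cur.reverse ++ s.filter (fun c => !PySem.Chars.isspace c) := by
  induction s with
  | nil =>
      intro cur acc
      by_cases h : cur.isEmpty <;>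
        simp_all [PySem.Chars.split₀.go, List.isEmpty_iff]
  | cons c rest ih =>
      intro cur acc
      by_cases hsp : PySem.Chars.isspace c
      · by_cases h : cur.isEmpty <;>
          simp_all [PySem.Chars.split₀.go, List.isEmpty_iff]
      · simp_all [PySem.Chars.split₀.go]

theorem pv_flatMap_split (book : String) :
    (PySem.Str.split₀ book).flatMap String.toList =
      book.toList.filter (fun c => !PySem.Chars.isspace c) := by
  rw [List.flatMap_def, PySem.Str.split₀_map_toList]
  have := pv_flatten_go book.toList [] []
  simpa [PySem.Chars.split₀] using this

theorem pv_foldl_filter {α β : Type} (p : α → Bool) (h : β → α → β) :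
    ∀ (l : List α) (b : β),
      l.foldl (fun b a => if p a then h b a else b) b = (l.filter p).foldl h b := by
  intro l
  induction l with
  | nil => intro b; rfl
  | cons x xs ih =>
      intro b
      by_cases hp : p x = true <;> simp [hp, ih]

theorem pv_discard_ofList {α : Type} [BEq α] [LawfulBEq α] (l : List α) (x : α) :
    (PySem.Set.ofList l).discard x = PySem.Set.ofList (l.filter (fun y => !(y == x))) := by
  induction l with
  | nil => rfl
  | cons a as ih =>
      by_cases h : a = x
      · subst h
        rw [PySem.Set.ofList_cons]
        simp only [PySem.Set.discard] at *
        rw [List.filter_cons_of_neg (by simp), List.filter_cons_of_neg (by simp),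
          List.filter_filter]
        simpa using ih
      · rw [PySem.Set.ofList_cons]
        simp only [PySem.Set.discard] at *
        rw [List.filter_cons_of_pos (by simp [h]), List.filter_cons_of_pos (by simp [h]),
          PySem.Set.ofList_cons]
        simp only [PySem.Set.discard, List.filter_filter, ← ih, List.filter_filter]
        congr 2
        funext y; rw [Bool.and_comm]

theorem pv_ofList_sublist {α : Type} [BEq α] [LawfulBEq α] (l : List α) :
    (PySem.Set.ofList l).Sublist l := by
  induction l with
  | nil => simp [PySem.Set.ofList]
  | cons a as ih =>
      rw [PySem.Set.ofList_cons]
      exact List.Sublist.cons₂ a ((List.filter_sublist).trans ih)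

theorem pv_ofList_map_inj {α β : Type} [BEq α] [LawfulBEq α] [BEq β] [LawfulBEq β]
    (f : α → β) (hf : Function.Injective f) (l : List α) :
    PySem.Set.ofList (l.map f) = (PySem.Set.ofList l).map f := by
  induction l with
  | nil => rfl
  | cons a as ih =>
      rw [List.map_cons, PySem.Set.ofList_cons, PySem.Set.ofList_cons, ih,
        PySem.Set.discard, PySem.Set.discard, List.filter_map, List.map_cons]
      have : ((fun y => !y == f a) ∘ f) = (fun y => !(y == a)) := by
        funext y; simp [hf.eq_iff]
      rw [this]

theorem pv_groups_eq : ∀ (l : List Char), l.Pairwise (· ≤ ·) →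
    pvGroups l = (PySem.Set.ofList l).map (fun c => (String.ofList [c], (l.count c : Int))) := by
  intro l
  induction l using pvGroups.induct with
  | case1 => intro _; simp [pvGroups, PySem.Set.ofList]
  | case2 c rest ih =>
      intro hp
      have hrest : rest.takeWhile (· == c) ++ rest.dropWhile (· == c) = rest :=
        List.takeWhile_append_dropWhile
      have hpr : rest.Pairwise (· ≤ ·) := hp.of_cons
      have hpd : (rest.dropWhile (· == c)).Pairwise (· ≤ ·) :=
        hpr.sublist (List.dropWhile_sublist _)
      have htc : ∀ x ∈ rest.takeWhile (· == c), x = c := by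
        intro x hx; simpa using List.mem_takeWhile_imp hx
      -- every element of the dropWhile part differs from c
      have hdc : ∀ x ∈ rest.dropWhile (· == c), x ≠ c := by
        intro x hx
        cases hdr : rest.dropWhile (· == c) with
        | nil => rw [hdr] at hx; cases hx
        | cons y ys =>
            have hyne : y ≠ c := by
              have w : rest.dropWhile (fun x => x == c) ≠ [] := by rw [hdr]; simp
              have hh := List.head_dropWhile_not (fun x => x == c) w
              have hy : (rest.dropWhile (fun x => x == c)).head w = y := by
                simp only [hdr, List.head_cons]
              rw [hy] at hh; simpa using hh
            have hyc : c < y := by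
              have hymem : y ∈ rest := (List.dropWhile_sublist _).subset (by rw [hdr]; simp)
              exact lt_of_le_of_ne (List.rel_of_pairwise_cons hp hymem) (Ne.symm hyne)
            rw [hdr] at hx hpd
            rcases List.mem_cons.mp hx with h | h
            · subst h; exact hyne
            · exact fun hxc => absurd (hxc ▸ List.rel_of_pairwise_cons hpd h) (not_le.mpr hyc)
      have hcount : (c :: rest).count c = 1 + (rest.takeWhile (· == c)).length := by
        rw [List.count_cons_self]
        have hr2 : rest.count c = (rest.takeWhile (· == c)).count c
            + (rest.dropWhile (· == c)).count c := by
          conv_lhs => rw [← hrest]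
          rw [List.count_append]
        have h1 : (rest.takeWhile (· == c)).count c = (rest.takeWhile (· == c)).length :=
          List.count_eq_length.mpr (fun b hb => (htc b hb).symm)
        have h2 : (rest.dropWhile (· == c)).count c = 0 :=
          List.count_eq_zero.mpr (fun h => hdc c h rfl)
        omega
      have hfilt : rest.filter (fun y => !(y == c)) = rest.dropWhile (· == c) := by
        conv_lhs => rw [← hrest]
        rw [List.filter_append]
        rw [List.filter_eq_nil_iff.mpr (by intro a ha; simp [htc a ha])]
        rw [List.filter_eq_self.mpr (by intro a ha; simp [hdc a ha])]
        simp
      have hset : PySem.Set.ofList (c :: rest) = c :: PySem.Set.ofList (rest.dropWhile (· == c)) := by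
        rw [PySem.Set.ofList_cons, pv_discard_ofList, hfilt]
      rw [pvGroups, hset, List.map_cons, ih hpd]
      congr 1
      · rw [hcount]; push_cast; ring_nf
      · apply List.map_congr_left
        intro a ha
        have haM : a ∈ rest.dropWhile (· == c) := by simpa [PySem.Set.mem_ofList] using ha
        have hane : a ≠ c := hdc a haM
        have h0 : (rest.takeWhile (· == c)).count a = 0 :=
          List.count_eq_zero.mpr (fun h => hane (htc a h))
        have h1 : (c :: rest).count a = (rest.dropWhile (· == c)).count a := by
          rw [List.count_cons]
          have : rest.count a = (rest.takeWhile (· == c)).count a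
              + (rest.dropWhile (· == c)).count a := by
            conv_lhs => rw [← hrest]
            rw [List.count_append]
          simp [this, h0]
          exact fun h => hane h.symm
        rw [h1]

theorem pv_sorted2_eq (xs : List (String × Int)) :
    PySem.List.sorted2 xs Prod.fst Prod.snd =
      PySem.List.sorted xs (fun a => toLex (a.1, a.2)) := by
  have hb : (fun (a b : String × Int) =>
        decide (a.1 < b.1) || (!decide (b.1 < a.1) && decide (a.2 < b.2)))
      = (fun (a b : String × Int) => decide (toLex (a.1, a.2) < toLex (b.1, b.2))) := by
    funext a b
    rw [Bool.eq_iff_iff]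
    simp only [Bool.or_eq_true, Bool.and_eq_true, Bool.not_eq_eq_eq_not, decide_eq_true_eq,
      Prod.Lex.toLex_lt_toLex]
    rcases lt_trichotomy a.1 b.1 with h | h | h
    · simp [h, lt_asymm h]
    · simp [h]
    · simp [lt_asymm h, h]
      exact fun hh => absurd hh (ne_of_gt h)
  simp only [PySem.List.sorted2, PySem.List.sorted, Bool.false_eq_true, if_false]
  rw [hb]

-- the dict built by A's double loop is Counter of the lowercased alphabetic letter strings
theorem pv_dictA_eq_counter (book : String) :
    (PySem.Str.split₀ book).foldl (fun d word =>
        word.toList.foldl (fun (d : PySem.Dict String Int) ch =>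
          let letter := PySem.Str.lower (String.ofList [ch])
          if PySem.Str.strIsalpha letter && d.contains letter then
            d.insert letter (d.getD letter 0 + 1)
          else if PySem.Str.strIsalpha letter then
            d.insert letter 1
          else d) d)
      PySem.Dict.empty
    = PySem.Dict.counter
        (((book.toList.filter PySem.Chars.isalpha).map PySem.Chars.lowerChar).map
          (fun c => String.ofList [c])) := by
  rw [← List.foldl_flatMap, pv_flatMap_split]
  have hstep : (fun (d : PySem.Dict String Int) ch =>
      let letter := PySem.Str.lower (String.ofList [ch])
      if PySem.Str.strIsalpha letter && d.contains letter then
        d.insert letter (d.getD letter 0 + 1)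
      else if PySem.Str.strIsalpha letter then
        d.insert letter 1
      else d)
    = (fun (d : PySem.Dict String Int) ch =>
        if PySem.Chars.isalpha (PySem.Chars.lowerChar ch) then
          d.insert (String.ofList [PySem.Chars.lowerChar ch])
            (d.getD (String.ofList [PySem.Chars.lowerChar ch]) 0 + 1)
        else d) := by
    funext d ch
    simp only [pv_lower_one, pv_strIsalpha_one]
    by_cases ha : PySem.Chars.isalpha (PySem.Chars.lowerChar ch)
    · by_cases hc : d.contains (String.ofList [PySem.Chars.lowerChar ch])
      · simp [ha, hc]
      · simp only [ha, hc, Bool.and_false, Bool.false_eq_true, if_false, if_true]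
        rw [PySem.Dict.getD_of_not_contains d 0 (by simpa using hc)]
        norm_num
    · simp [ha]
  rw [hstep, pv_foldl_filter, List.filter_filter]
  have hff : (book.toList.filter fun a =>
        PySem.Chars.isalpha (PySem.Chars.lowerChar a) && !PySem.Chars.isspace a)
      = book.toList.filter PySem.Chars.isalpha := by
    apply List.filter_congr
    intro a _
    rw [pv_alpha_lower]
    by_cases h : PySem.Chars.isalpha a
    · simp [h, pv_alpha_not_space a h]
    · simp [h]
  rw [hff, ← PySem.Dict.foldl_insert_getD_add_one_eq_counter, List.foldl_map, List.foldl_map]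

-- ===== VERDICT (by name: the statement is the Claim_ definition above) =====
theorem dict_char_count_spec : Claim_equal_dict_char_count := by
  intro book _
  unfold Spec_dict_char_count
  simp only [dict_char_count, dict_char_count_alt]
  rw [pv_dictA_eq_counter]
  set lcs := (book.toList.filter PySem.Chars.isalpha).map PySem.Chars.lowerChar with hlcs
  set ys := (PySem.List.sorted (PySem.Set.ofList lcs) (fun x => x)).map
      (fun c => (String.ofList [c], (lcs.count c : Int))) with hys
  have h_items : (PySem.Dict.counter (lcs.map (fun c => String.ofList [c]))).items
      = (PySem.Set.ofList lcs).map (fun c => (String.ofList [c], (lcs.count c : Int))) := by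
    rw [PySem.Dict.items_counter, pv_ofList_map_inj _ pv_s1_inj, List.map_map]
    apply List.map_congr_left
    intro a _
    simp [List.count_map_of_injective _ _ pv_s1_inj]
  have h_A : PySem.List.sorted2
      (PySem.Dict.counter (lcs.map (fun c => String.ofList [c]))).items Prod.fst Prod.snd = ys := by
    rw [pv_sorted2_eq, h_items]
    apply PySem.List.sorted_eq_of_perm_of_pairwise_lt
    · exact (PySem.List.sorted_perm _ _ _).map _
    · rw [hys, List.pairwise_map]
      apply (PySem.List.sorted_ofList_pairwise_lt lcs).imp
      intro a b hab
      exact Prod.Lex.toLex_lt_toLex.mpr (Or.inl (pv_s1_lt hab))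
  have h_B : pvGroups (PySem.List.sorted lcs (fun x => x)) = ys := by
    rw [pv_groups_eq _ (PySem.List.sorted_pairwise lcs (fun x => x))]
    have hof : PySem.Set.ofList (PySem.List.sorted lcs (fun x => x))
        = PySem.List.sorted (PySem.Set.ofList lcs) (fun x => x) := by
      have hlt1 : (PySem.Set.ofList (PySem.List.sorted lcs (fun x => x))).Pairwise (· < ·) := by
        have hle : (PySem.Set.ofList (PySem.List.sorted lcs (fun x => x))).Pairwise (· ≤ ·) :=
          (PySem.List.sorted_pairwise lcs (fun x => x)).sublist (pv_ofList_sublist _)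
        have hne : (PySem.Set.ofList (PySem.List.sorted lcs (fun x => x))).Nodup :=
          PySem.Set.nodup_ofList _
        exact (hle.and hne).imp (fun h => lt_of_le_of_ne h.1 h.2)
      have hlt2 := PySem.List.sorted_ofList_pairwise_lt lcs
      have hperm : (PySem.Set.ofList (PySem.List.sorted lcs (fun x => x))).Perm
          (PySem.List.sorted (PySem.Set.ofList lcs) (fun x => x)) := by
        apply (List.perm_ext_iff_of_nodup (PySem.Set.nodup_ofList _)
          ((PySem.List.sorted_perm _ _ _).nodup_iff.mpr (PySem.Set.nodup_ofList _))).mpr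
        intro a
        rw [PySem.Set.mem_ofList, PySem.List.mem_sorted, PySem.List.mem_sorted,
          PySem.Set.mem_ofList]
      exact List.Perm.eq_of_pairwise (fun a b _ _ h1 h2 => absurd h2 (not_lt.mpr h1.le))
        hlt1 hlt2 hperm
    rw [hof, hys]
    apply List.map_congr_left
    intro a _
    rw [(PySem.List.sorted_perm lcs (fun x => x) false).count_eq]
  rw [h_A, h_B]
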